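-- pv_equiv track=rewrite | github.com/petteriTeikari/deep-biblio-tools | src/converters/md_to_latex/zotero_integration.py | _get_first_title_word
-- ===== SOURCE A (Python) =====
-- def _get_first_title_word(title: str) -> str:
--     """Get first significant word from title."""
--     skip_words = {
--         "a",
--         "an",
--         "the",
--         "of",
--         "in",
--         "on",
--         "at",
--         "to",
--         "for",
--         "with",
--         "by",
--     }
--
--     # Clean title without regex
--     clean_chars = []
--     for char in title:
--         if char.isalpha() or char.isspace():
--             clean_chars.append(char)
--         else:
--             clean_chars.append(" ")
--
--     clean_title = "".join(clean_chars)
--     words = clean_title.split()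
--
--     for word in words:
--         if word.lower() not in skip_words and len(word) > 2:
--             return word[0].upper() + word[1:].lower()
--
--     return ""
-- ===== SOURCE B (Python) =====
-- def _get_first_title_word(title: str) -> str:
--     """Get first significant word from title."""
--     skip_words = {
--         "a",
--         "an",
--         "the",
--         "of",
--         "in",
--         "on",
--         "at",
--         "to",
--         "for",
--         "with",
--         "by",
--     }
--
--     # Single streaming pass: maximal runs of alphabetic characters are the words.
--     buf = ""
--     for char in title:
--         if char.isalpha():
--             buf += char
--         elif buf:
--             if buf.lower() not in skip_words and len(buf) > 2:
--                 return buf[0].upper() + buf[1:].lower()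
--             buf = ""
--     if buf and buf.lower() not in skip_words and len(buf) > 2:
--         return buf[0].upper() + buf[1:].lower()
--     return ""
-- ===== Notes on version B (the rewrite author's own statement) =====
-- stated objective: simpler
-- what changed: Replaces A's three passes (build a cleaned character list, join and split it into a word list, then scan the words) by one streaming pass over the characters that keeps a current-word buffer and decides each word at its boundary.
import Mathlib
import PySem

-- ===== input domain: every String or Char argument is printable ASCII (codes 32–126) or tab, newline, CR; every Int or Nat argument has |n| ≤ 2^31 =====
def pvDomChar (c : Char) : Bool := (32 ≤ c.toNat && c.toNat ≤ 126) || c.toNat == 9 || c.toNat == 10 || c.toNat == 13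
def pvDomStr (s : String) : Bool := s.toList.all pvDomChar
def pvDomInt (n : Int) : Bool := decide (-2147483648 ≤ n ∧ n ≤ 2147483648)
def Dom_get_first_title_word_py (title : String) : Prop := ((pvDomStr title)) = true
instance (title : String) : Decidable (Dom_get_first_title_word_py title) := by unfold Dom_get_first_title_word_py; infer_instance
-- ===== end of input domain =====

-- B replaces A's three passes (clean the characters, split into a word list, scan the words)
-- by one streaming pass over the characters with a current-word buffer; same cost, simpler shape.


-- skip_words (identical literal in A and B)
def pvSkip : List (List Char) :=
  [['a'], ['a','n'], ['t','h','e'], ['o','f'], ['i','n'], ['o','n'], ['a','t'], ['t','o'],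
   ['f','o','r'], ['w','i','t','h'], ['b','y']]

-- `word.lower() not in skip_words and len(word) > 2` (identical line in A and B)
def pvQual (w : List Char) : Bool :=
  !pvSkip.contains (PySem.Chars.lower w) && decide (2 < w.length)

-- `word[0].upper() + word[1:].lower()` (identical line in A and B; only reached with len(word) > 2,
-- so the word is nonempty and the [] case is never hit)
def pvFmt (w : List Char) : String :=
  match w with
  | [] => ""
  | c :: rest => String.ofList (PySem.Chars.upperChar c :: PySem.Chars.lower rest)

-- ===== PORT A =====
-- `for word in words: if … return …` over the word list
def pvALoop (words : List (List Char)) : String :=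
  match words with
  | [] => ""
  | w :: rest => if pvQual w then pvFmt w else pvALoop rest

def get_first_title_word_py (title : String) : String :=
  -- clean_chars loop: keep alphabetic/whitespace characters, replace everything else by ' '
  let cleanChars : List Char :=
    title.toList.foldl
      (fun acc c => acc ++ [if PySem.Chars.isalpha c || PySem.Chars.isspace c then c else ' ']) []
  -- clean_title = "".join(clean_chars); words = clean_title.split()
  pvALoop (PySem.Chars.split₀ cleanChars)

-- ===== PORT B =====
-- the streaming loop of Source B: buf is the current run of alphabetic characters
def pvAltGo (cs : List Char) (buf : List Char) : String :=
  match cs with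
  | [] => if !buf.isEmpty && pvQual buf then pvFmt buf else ""
  | c :: rest =>
    if PySem.Chars.isalpha c then pvAltGo rest (buf ++ [c])
    else if buf.isEmpty then pvAltGo rest buf
    else if pvQual buf then pvFmt buf
    else pvAltGo rest []

def get_first_title_word_py_alt (title : String) : String :=
  pvAltGo title.toList []

-- ===== PRECONDITION & SPEC =====
def Spec_get_first_title_word_py (title : String) (out : String) : Prop := out = get_first_title_word_py_alt title
instance (title : String) (out : String) : Decidable (Spec_get_first_title_word_py title out) := by unfold Spec_get_first_title_word_py; infer_instance

-- ===== CLAIM (what is proved, stated in full; the proofs are below) =====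
def Claim_equal_get_first_title_word_py : Prop := ∀ (title : String), Dom_get_first_title_word_py title → Spec_get_first_title_word_py title (get_first_title_word_py title)

-- ===== LEMMAS AND PROOFS =====

-- A's cleaning of one character
def pvCleanChar (c : Char) : Char :=
  if PySem.Chars.isalpha c || PySem.Chars.isspace c then c else ' '

lemma pv_alpha_not_space (c : Char) (h : PySem.Chars.isalpha c = true) :
    PySem.Chars.isspace c = false := by
  have h' : 65 ≤ c.toNat ∧ c.toNat ≤ 90 ∨ 97 ≤ c.toNat ∧ c.toNat ≤ 122 := by
    simp only [PySem.Chars.isalpha, PySem.Chars.isupper, PySem.Chars.islower, Bool.or_eq_true,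
      Bool.and_eq_true, decide_eq_true_eq, Char.le_def, UInt32.le_iff_toNat_le] at h
    exact h
  simp only [PySem.Chars.isspace, Bool.or_eq_false_iff, Bool.and_eq_false_iff,
    decide_eq_false_iff_not]
  omega

lemma pv_clean_space (c : Char) (h : PySem.Chars.isalpha c = false) :
    PySem.Chars.isspace (pvCleanChar c) = true := by
  unfold pvCleanChar
  rcases hs : PySem.Chars.isspace c with _ | _
  · simp only [h, Bool.or_false, Bool.false_eq_true, if_false]
    decide
  · simp [h, hs]

lemma pv_go_acc (cs cur : List Char) (acc : List (List Char)) :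
    PySem.Chars.split₀.go cs cur acc = acc.reverse ++ PySem.Chars.split₀.go cs cur [] := by
  induction cs generalizing cur acc with
  | nil => by_cases h : cur.isEmpty <;> simp [PySem.Chars.split₀.go, h]
  | cons c rest ih =>
    by_cases hs : PySem.Chars.isspace c
    · by_cases h : cur.isEmpty
      · simp only [PySem.Chars.split₀.go, hs, h, if_true]
        exact ih [] acc
      · simp only [PySem.Chars.split₀.go, hs, h, if_true]
        rw [ih [] (cur.reverse :: acc), ih [] [cur.reverse]]
        simp
    · simp only [PySem.Chars.split₀.go, hs]
      exact ih _ _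

lemma pv_main (cs buf : List Char) :
    pvALoop (PySem.Chars.split₀.go (cs.map pvCleanChar) buf.reverse []) = pvAltGo cs buf := by
  induction cs generalizing buf with
  | nil =>
    by_cases h : buf.isEmpty
    · have hb := List.isEmpty_iff.mp h
      subst hb
      simp [PySem.Chars.split₀.go, pvALoop, pvAltGo]
    · simp [PySem.Chars.split₀.go, h, pvALoop, pvAltGo]
  | cons c rest ih =>
    by_cases ha : PySem.Chars.isalpha c
    · have hcl : pvCleanChar c = c := by simp [pvCleanChar, ha]
      have hns := pv_alpha_not_space c ha
      simp only [List.map_cons, hcl, PySem.Chars.split₀.go, hns, Bool.false_eq_true, if_false,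
        pvAltGo, ha, if_true]
      have : c :: buf.reverse = (buf ++ [c]).reverse := by simp
      rw [this, ih]
    · have ha' : PySem.Chars.isalpha c = false := by simpa using ha
      have hsp := pv_clean_space c ha'
      by_cases h : buf.isEmpty
      · simp only [List.map_cons, PySem.Chars.split₀.go, hsp, if_true, pvAltGo, ha', h]
        have hb : buf = [] := List.isEmpty_iff.mp h
        subst hb
        simpa using ih []
      · simp only [List.map_cons, PySem.Chars.split₀.go, hsp, if_true, pvAltGo, ha', h]
        rw [show buf.reverse.isEmpty = false by simpa using h]
        simp only [Bool.false_eq_true, if_false]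
        rw [pv_go_acc, List.reverse_reverse]
        simp only [List.reverse_singleton, List.singleton_append, pvALoop]
        by_cases hq : pvQual buf
        · rw [if_pos hq, if_pos hq]
        · rw [if_neg hq, if_neg hq]
          simpa using ih []

-- ===== VERDICT (by name: the statement is the Claim_ definition above) =====
theorem get_first_title_word_py_spec : Claim_equal_get_first_title_word_py := by
  intro title _
  unfold Spec_get_first_title_word_py get_first_title_word_py get_first_title_word_py_alt
  rw [PySem.List.foldl_append_singleton_eq_map]
  show pvALoop (PySem.Chars.split₀ (title.toList.map pvCleanChar)) = _
  unfold PySem.Chars.split₀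
  simpa using pv_main title.toList []
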